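-- pv_equiv track=rewrite | github.com/gotham29/htm-monitor | src/htm_monitor/cli/analyze_run.py | _collapse_t_points_to_windows
-- ===== SOURCE A (Python) =====
-- from typing import Any, Dict, List, Optional, Sequence, Set, Tuple
--
-- def _collapse_t_points_to_windows(t_points: List[int]) -> List[Tuple[int, int]]:
--     """
--     Collapse sorted timestep points into contiguous inclusive windows.
--     """
--     pts = sorted(set(int(x) for x in t_points))
--     if not pts:
--         return []
--     out: List[Tuple[int, int]] = []
--     start = pts[0]
--     prev = pts[0]
--     for t in pts[1:]:
--         if int(t) == int(prev) + 1:
--             prev = int(t)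
--             continue
--         out.append((int(start), int(prev)))
--         start = int(t)
--         prev = int(t)
--     out.append((int(start), int(prev)))
--     return out
-- ===== SOURCE B (Python) =====
-- def _collapse_t_points_to_windows(t_points):
--     """Collapse integer points into contiguous inclusive windows (set-membership form)."""
--     s = set(int(x) for x in t_points)
--     pts = sorted(s)
--     starts = [t for t in pts if t - 1 not in s]
--     ends = [t for t in pts if t + 1 not in s]
--     return list(zip(starts, ends))
-- ===== Notes on version B (the rewrite author's own statement) =====
-- stated objective: idiomatic
-- what changed: Replaced the start/prev neighbor-comparison state machine with the set-membership decomposition: window starts are points t with t-1 not in the set, window ends are points t with t+1 not in the set, zipped in sorted order.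
import Mathlib
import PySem

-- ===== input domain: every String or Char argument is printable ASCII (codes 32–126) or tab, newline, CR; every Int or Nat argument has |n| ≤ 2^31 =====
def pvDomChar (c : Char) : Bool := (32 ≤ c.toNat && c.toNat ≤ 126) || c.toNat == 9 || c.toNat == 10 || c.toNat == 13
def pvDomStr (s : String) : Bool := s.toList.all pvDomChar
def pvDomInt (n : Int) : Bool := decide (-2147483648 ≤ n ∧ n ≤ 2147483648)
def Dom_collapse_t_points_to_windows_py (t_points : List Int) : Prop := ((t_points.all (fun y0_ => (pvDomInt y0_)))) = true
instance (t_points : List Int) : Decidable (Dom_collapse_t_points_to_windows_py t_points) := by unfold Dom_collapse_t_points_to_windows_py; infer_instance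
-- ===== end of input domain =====

-- B replaces A's start/prev neighbor-scan state machine with the set-membership
-- decomposition (starts = points with no predecessor in the set, ends = points with
-- no successor, zipped); objective: idiomatic, same asymptotic cost.

-- ===== PORT A =====
def collapse_t_points_to_windows_py (t_points : List Int) : List (Int × Int) :=
  -- pts = sorted(set(int(x) for x in t_points))  (int(x) = x on Int)
  let pts := PySem.List.sorted (PySem.Set.ofList t_points) (fun x => x) false
  match pts with
  | [] => []                                     -- if not pts: return []
  | p :: rest =>
    -- out = []; start = pts[0]; prev = pts[0]; for t in pts[1:]: …
    let st := rest.foldl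
      (fun (s : List (Int × Int) × Int × Int) t =>
        if t = s.2.2 + 1 then (s.1, s.2.1, t)
        else (s.1 ++ [(s.2.1, s.2.2)], t, t))
      (([] : List (Int × Int)), p, p)
    st.1 ++ [(st.2.1, st.2.2)]                   -- out.append((start, prev))

-- ===== PORT B =====
def collapse_t_points_to_windows_py_alt (t_points : List Int) : List (Int × Int) :=
  let s : PySem.Set Int := PySem.Set.ofList t_points
  let pts := PySem.List.sorted s (fun x => x) false
  let starts := pts.filter (fun t => !(PySem.Set.contains s (t - 1)))
  let ends := pts.filter (fun t => !(PySem.Set.contains s (t + 1)))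
  starts.zip ends

-- ===== PRECONDITION & SPEC =====
def Spec_collapse_t_points_to_windows_py (t_points : List Int) (out : List (Int × Int)) : Prop := out = collapse_t_points_to_windows_py_alt t_points
instance (t_points : List Int) (out : List (Int × Int)) : Decidable (Spec_collapse_t_points_to_windows_py t_points out) := by unfold Spec_collapse_t_points_to_windows_py; infer_instance

-- ===== CLAIM (what is proved, stated in full; the proofs are below) =====
def Claim_equal_collapse_t_points_to_windows_py : Prop := ∀ (t_points : List Int), Dom_collapse_t_points_to_windows_py t_points → Spec_collapse_t_points_to_windows_py t_points (collapse_t_points_to_windows_py t_points)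

-- ===== LEMMAS AND PROOFS =====

-- canonical recursive form of A's window loop
def pvGo (start prev : Int) : List Int → List (Int × Int)
  | [] => [(start, prev)]
  | t :: ts => if t = prev + 1 then pvGo start t ts else (start, prev) :: pvGo t t ts

theorem pvGo_foldl (ts : List Int) : ∀ (out : List (Int × Int)) (a b : Int),
    (let st := ts.foldl
      (fun (s : List (Int × Int) × Int × Int) t =>
        if t = s.2.2 + 1 then (s.1, s.2.1, t)
        else (s.1 ++ [(s.2.1, s.2.2)], t, t)) (out, a, b)
     st.1 ++ [(st.2.1, st.2.2)]) = out ++ pvGo a b ts := by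
  induction ts with
  | nil => intro out a b; simp [pvGo]
  | cons t ts ih =>
    intro out a b
    simp only [List.foldl_cons, pvGo]
    by_cases h : t = b + 1
    · simp [h, ih]
    · simp [h, ih]

theorem pvGo_start (ts : List Int) : ∀ (p : Int), ∃ e r, ∀ s, pvGo s p ts = (s, e) :: r := by
  induction ts with
  | nil => intro p; exact ⟨p, [], fun s => rfl⟩
  | cons t ts ih =>
    intro p
    by_cases h : t = p + 1
    · obtain ⟨e, r, hr⟩ := ih t
      exact ⟨e, r, fun s => by subst h; simp [pvGo, hr s]⟩
    · exact ⟨p, pvGo t t ts, fun s => by simp [pvGo, h]⟩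

-- B's starts/ends filters on the sorted dedup list itself
def pvStarts (l : List Int) : List Int := l.filter (fun t => !(decide ((t - 1) ∈ l)))
def pvEnds (l : List Int) : List Int := l.filter (fun t => !(decide ((t + 1) ∈ l)))

theorem pv_main (xs : List Int) : ∀ (p : Int), (p :: xs).Pairwise (· < ·) →
    (pvStarts (p :: xs)).zip (pvEnds (p :: xs)) = pvGo p p xs := by
  induction xs with
  | nil =>
    intro p _
    simp [pvStarts, pvEnds, pvGo, List.filter,
      show ¬ (p - 1 = p) from by omega, show ¬ (p + 1 = p) from by omega]
  | cons t ts ih =>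
    intro p hp
    have hpt : p < t := (List.pairwise_cons.1 hp).1 t (by simp)
    have hpts : ∀ u ∈ ts, p < u := fun u hu => (List.pairwise_cons.1 hp).1 u (by simp [hu])
    have htail : (t :: ts).Pairwise (· < ·) := (List.pairwise_cons.1 hp).2
    have htts : ∀ u ∈ ts, t < u := (List.pairwise_cons.1 htail).1
    have hA : (p - 1) ∉ (p :: t :: ts) := by
      intro hm
      rcases List.mem_cons.1 hm with h1 | hm1
      · omega
      rcases List.mem_cons.1 hm1 with h1 | h1
      · omega
      · exact absurd (hpts _ h1) (by omega)
    have hB2 : (t - 1) ∉ (t :: ts) := by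
      intro hm
      rcases List.mem_cons.1 hm with h1 | h1
      · omega
      · exact absurd (htts _ h1) (by omega)
    -- elements of ts see the same membership with or without p in front
    have hCs : ∀ u ∈ ts, (!decide ((u - 1) ∈ (p :: t :: ts))) = (!decide ((u - 1) ∈ (t :: ts))) := by
      intro u hu
      have hut : t < u := htts u hu
      by_cases hm : (u - 1) ∈ (t :: ts)
      · simp [hm, show (u - 1) ∈ (p :: t :: ts) from List.mem_cons.2 (Or.inr hm)]
      · have hnb : (u - 1) ∉ (p :: t :: ts) := by
          intro hm2
          rcases List.mem_cons.1 hm2 with h1 | h1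
          · omega
          · exact hm h1
        simp [hm, hnb]
    have hCe : ∀ v ∈ (t :: ts), (!decide ((v + 1) ∈ (p :: t :: ts))) = (!decide ((v + 1) ∈ (t :: ts))) := by
      intro v hv
      have hvt : t ≤ v := by
        rcases List.mem_cons.1 hv with h1 | h1
        · omega
        · exact le_of_lt (htts v h1)
      by_cases hm : (v + 1) ∈ (t :: ts)
      · simp [hm, show (v + 1) ∈ (p :: t :: ts) from List.mem_cons.2 (Or.inr hm)]
      · have hnb : (v + 1) ∉ (p :: t :: ts) := by
          intro hm2
          rcases List.mem_cons.1 hm2 with h1 | h1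
          · omega
          · exact hm h1
        simp [hm, hnb]
    by_cases h : t = p + 1
    · -- consecutive: t joins p's window
      have hB : (t - 1) ∈ (p :: t :: ts) := by simp [h]
      have hp1 : (p + 1) ∈ (p :: t :: ts) := by subst h; simp
      have hstart_big : pvStarts (p :: t :: ts) =
          p :: List.filter (fun u => !decide ((u - 1) ∈ (t :: ts))) ts := by
        simp only [pvStarts]
        rw [List.filter_cons_of_pos (by simp [hA]), List.filter_cons_of_neg (by simp [hB]),
          List.filter_congr hCs]
      have hstart_small : pvStarts (t :: ts) =
          t :: List.filter (fun u => !decide ((u - 1) ∈ (t :: ts))) ts := by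
        simp only [pvStarts]
        rw [List.filter_cons_of_pos (by simp [hB2])]
      have hend_big : pvEnds (p :: t :: ts) = pvEnds (t :: ts) := by
        simp only [pvEnds]
        rw [List.filter_cons_of_neg (by simp [hp1])]
        exact List.filter_congr hCe
      obtain ⟨e, r, hr⟩ := pvGo_start ts t
      have hih := ih t htail
      rw [hstart_small, hr t] at hih
      have hne : pvEnds (t :: ts) ≠ [] := by
        intro hnil; rw [hnil] at hih; simp at hih
      obtain ⟨e1, E, hE⟩ := List.exists_cons_of_ne_nil hne
      rw [hE] at hih
      simp only [List.zip_cons_cons, List.cons.injEq, Prod.mk.injEq] at hih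
      obtain ⟨⟨-, he1⟩, hrest⟩ := hih
      rw [hstart_big, hend_big, hE]
      simp only [List.zip_cons_cons, hrest, he1]
      rw [show pvGo p p (t :: ts) = pvGo p t ts from by simp [pvGo, h], hr p]
    · -- gap: p closes its own window
      have hBt : (t - 1) ∉ (p :: t :: ts) := by
        intro hm
        rcases List.mem_cons.1 hm with h1 | hm1
        · omega
        rcases List.mem_cons.1 hm1 with h1 | h1
        · omega
        · exact absurd (htts _ h1) (by omega)
      have hp1' : (p + 1) ∉ (p :: t :: ts) := by
        intro hm
        rcases List.mem_cons.1 hm with h1 | hm1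
        · omega
        rcases List.mem_cons.1 hm1 with h1 | h1
        · omega
        · exact absurd (htts _ h1) (by omega)
      have hCst : ∀ u ∈ (t :: ts), (!decide ((u - 1) ∈ (p :: t :: ts))) = (!decide ((u - 1) ∈ (t :: ts))) := by
        intro u hu
        rcases List.mem_cons.1 hu with rfl | hu'
        · simp [hBt, hB2]
        · exact hCs u hu'
      have hstart_big : pvStarts (p :: t :: ts) = p :: pvStarts (t :: ts) := by
        simp only [pvStarts]
        rw [List.filter_cons_of_pos (by simp [hA])]
        congr 1
        exact List.filter_congr hCst
      have hend_big : pvEnds (p :: t :: ts) = p :: pvEnds (t :: ts) := by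
        simp only [pvEnds]
        rw [List.filter_cons_of_pos (by simp [hp1'])]
        congr 1
        exact List.filter_congr hCe
      rw [hstart_big, hend_big]
      simp only [List.zip_cons_cons, ih t htail]
      simp [pvGo, h]

-- bridge: B's filters over the set equal the self-referential filters over pts
theorem pv_alt_eq (t_points : List Int) :
    collapse_t_points_to_windows_py_alt t_points =
      (pvStarts (PySem.List.sorted (PySem.Set.ofList t_points) (fun x => x) false)).zip
      (pvEnds (PySem.List.sorted (PySem.Set.ofList t_points) (fun x => x) false)) := by
  show (List.filter (fun t => !(PySem.Set.contains (PySem.Set.ofList t_points) (t - 1)))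
          (PySem.List.sorted (PySem.Set.ofList t_points) (fun x => x) false)).zip
       (List.filter (fun t => !(PySem.Set.contains (PySem.Set.ofList t_points) (t + 1)))
          (PySem.List.sorted (PySem.Set.ofList t_points) (fun x => x) false)) = _
  unfold pvStarts pvEnds
  congr 1
  · apply List.filter_congr
    intro u _
    by_cases hm : (u - 1) ∈ t_points <;>
      simp [hm, PySem.List.mem_sorted, PySem.Set.mem_ofList]
  · apply List.filter_congr
    intro u _
    by_cases hm : (u + 1) ∈ t_points <;>
      simp [hm, PySem.List.mem_sorted, PySem.Set.mem_ofList]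

-- ===== VERDICT (by name: the statement is the Claim_ definition above) =====
theorem collapse_t_points_to_windows_py_spec : Claim_equal_collapse_t_points_to_windows_py := by
  intro t_points _
  show collapse_t_points_to_windows_py t_points = collapse_t_points_to_windows_py_alt t_points
  rw [pv_alt_eq]
  unfold collapse_t_points_to_windows_py
  have hpw := PySem.List.sorted_ofList_pairwise_lt (xs := t_points)
  generalize PySem.List.sorted (PySem.Set.ofList t_points) (fun x => x) false = l at hpw ⊢
  cases l with
  | nil => rfl
  | cons p rest =>
    exact (pvGo_foldl rest [] p p).trans
      (by rw [List.nil_append]; exact (pv_main rest p hpw).symm)
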